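-- pv_equiv track=rewrite | github.com/DylanBorchert/AOC23 | day3.py | group_numbers
-- ===== SOURCE A (Python) =====
-- def group_numbers(array):
--     new_array = []
--     i = 0
--     while i < len(array):
--         if array[i].isdigit():
--             # Combine consecutive digits
--             number = array[i]
--             i += 1
--             while i < len(array) and array[i].isdigit():
--                 number += array[i]
--                 i += 1
--             # Append the number three times
--             new_array.extend([number] * len(str(number)))
--         else:
--             new_array.append(array[i])
--             i += 1
--     return new_array
-- ===== SOURCE B (Python) =====
-- def group_numbers(array):
--     new_array = []
--     run = []
--     for x in array:
--         if x.isdigit():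
--             run.append(x)
--         else:
--             if run:
--                 s = "".join(run)
--                 new_array.extend([s] * len(s))
--                 run = []
--             new_array.append(x)
--     if run:
--         s = "".join(run)
--         new_array.extend([s] * len(s))
--     return new_array
-- ===== Notes on version B (the rewrite author's own statement) =====
-- stated objective: alternative
-- what changed: Replaces A's index-driven outer/inner while-loop pair (inner loop scans ahead to consume a digit run) by a single for-pass that carries a pending digit-run accumulator, flushing it (join + repeat) at each non-digit element and once after the loop.
import Mathlib
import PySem

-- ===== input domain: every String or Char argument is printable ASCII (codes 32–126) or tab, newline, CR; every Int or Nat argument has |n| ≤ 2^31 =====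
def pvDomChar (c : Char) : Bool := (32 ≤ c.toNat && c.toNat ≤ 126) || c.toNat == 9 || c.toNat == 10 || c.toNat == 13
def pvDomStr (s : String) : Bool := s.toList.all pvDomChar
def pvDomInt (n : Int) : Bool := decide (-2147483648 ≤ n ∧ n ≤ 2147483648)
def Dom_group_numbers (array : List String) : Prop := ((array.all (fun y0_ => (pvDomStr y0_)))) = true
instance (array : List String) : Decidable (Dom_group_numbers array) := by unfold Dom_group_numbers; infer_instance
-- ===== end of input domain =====

-- B replaces A's index-driven nested while-loops by a single pass carrying a pending digit-run
-- accumulator that is flushed at each non-digit element and once at the end (objective: alternative).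

-- ===== PORT A =====
-- the inner `while i < len(array) and array[i].isdigit()` loop; `number` (a Python str built by
-- `+=`) is kept as its character list so concatenation is kernel-transparent; returns (number, i)
def gnInner (array : List String) (i : Nat) (number : List Char) : List Char × Nat :=
  if h : i < array.length then
    if PySem.Str.strIsdigit array[i] then gnInner array (i + 1) (number ++ array[i].toList)
    else (number, i)
  else (number, i)
termination_by array.length - i

-- the loop index never decreases (needed for the outer loop's termination)
theorem gnInner_snd_ge (array : List String) (i : Nat) (number : List Char) :
    i ≤ (gnInner array i number).2 := by
  unfold gnInner
  split
  · split
    · exact Nat.le_trans (Nat.le_succ i) (gnInner_snd_ge array (i + 1) _)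
    · exact Nat.le_refl i
  · exact Nat.le_refl i
termination_by array.length - i

-- the outer `while i < len(array)` loop with accumulator new_array
def gnLoop (array : List String) (i : Nat) (new_array : List String) : List String :=
  if h : i < array.length then
    if PySem.Str.strIsdigit array[i] then
      let r := gnInner array (i + 1) array[i].toList
      gnLoop array r.2 (new_array ++ List.replicate r.1.length (String.ofList r.1))
    else gnLoop array (i + 1) (new_array ++ [array[i]])
  else new_array
termination_by array.length - i
decreasing_by
  · have := gnInner_snd_ge array (i + 1) array[i].toList
    omega
  · omega

def group_numbers (array : List String) : List String := gnLoop array 0 []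

-- ===== PORT B =====
-- `if run: s = "".join(run); new_array.extend([s] * len(s))` ("".join of the run rendered as the
-- flatten of the character lists — exact for concatenation of strings)
def gnFlush (new_array run : List String) : List String :=
  if run.isEmpty then new_array
  else
    let s := (run.map String.toList).flatten
    new_array ++ List.replicate s.length (String.ofList s)

-- one iteration of the `for x in array` loop over the state (new_array, run)
def gnStep (st : List String × List String) (x : String) : List String × List String :=
  if PySem.Str.strIsdigit x then (st.1, st.2 ++ [x])
  else (gnFlush st.1 st.2 ++ [x], [])

def group_numbers_alt (array : List String) : List String :=
  let st := array.foldl gnStep ([], [])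
  gnFlush st.1 st.2

-- ===== PRECONDITION & SPEC =====
def Spec_group_numbers (array : List String) (out : List String) : Prop := out = group_numbers_alt array
instance (array : List String) (out : List String) : Decidable (Spec_group_numbers array out) := by unfold Spec_group_numbers; infer_instance

-- ===== CLAIM (what is proved, stated in full; the proofs are below) =====
def Claim_equal_group_numbers : Prop := ∀ (array : List String), Dom_group_numbers array → Spec_group_numbers array (group_numbers array)

-- ===== LEMMAS AND PROOFS =====

-- "run B's loop over l from state (acc, run), then do the final flush"
def gnG (acc run l : List String) : List String :=
  gnFlush (l.foldl gnStep (acc, run)).1 (l.foldl gnStep (acc, run)).2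

theorem gnFlush_nil (acc : List String) : gnFlush acc [] = acc := rfl

theorem gnFlush_cons (acc : List String) (x : String) (run : List String) :
    gnFlush acc (x :: run) =
      acc ++ List.replicate (x.toList ++ ((run.map String.toList)).flatten).length
        (String.ofList (x.toList ++ ((run.map String.toList)).flatten)) := by
  simp [gnFlush]

theorem gnG_cons_digit (acc run : List String) (x : String) (xs : List String)
    (hx : PySem.Str.strIsdigit x = true) :
    gnG acc run (x :: xs) = gnG acc (run ++ [x]) xs := by
  simp only [gnG, List.foldl_cons, gnStep]
  rw [if_pos hx]

theorem gnG_cons_nondigit (acc run : List String) (x : String) (xs : List String)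
    (hx : ¬ PySem.Str.strIsdigit x = true) :
    gnG acc run (x :: xs) = gnG (gnFlush acc run ++ [x]) [] xs := by
  simp only [gnG, List.foldl_cons, gnStep]
  rw [if_neg hx]

-- the pending run absorbs the longest digit prefix of the remaining input
theorem gnG_takeWhile (l : List String) : ∀ acc run,
    gnG acc run l =
      gnG acc (run ++ l.takeWhile (fun x => PySem.Str.strIsdigit x))
        (l.dropWhile (fun x => PySem.Str.strIsdigit x)) := by
  induction l with
  | nil => intro acc run; simp
  | cons x xs ih =>
    intro acc run
    simp only [List.takeWhile_cons, List.dropWhile_cons]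
    by_cases hx : PySem.Str.strIsdigit x = true
    · rw [if_pos hx, if_pos hx, gnG_cons_digit acc run x xs hx, ih]
      simp
    · rw [if_neg hx, if_neg hx, List.append_nil]

-- flushing early changes nothing when the next element (if any) is not a digit string
theorem gnG_flush (rest : List String) (acc run : List String)
    (h : ∀ y ∈ rest.head?, ¬ PySem.Str.strIsdigit y = true) :
    gnG acc run rest = gnG (gnFlush acc run) [] rest := by
  cases rest with
  | nil => rfl
  | cons y ys =>
    have hy : ¬ PySem.Str.strIsdigit y = true := h y (by simp)
    rw [gnG_cons_nondigit acc run y ys hy, gnG_cons_nondigit (gnFlush acc run) [] y ys hy,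
      gnFlush_nil]

-- two general list facts used below
theorem gn_takeWhile_len_le {α : Type} (l : List α) (p : α → Bool) :
    (l.takeWhile p).length ≤ l.length := by
  induction l with
  | nil => simp
  | cons x xs ih =>
    by_cases h : p x
    · simp [h]; omega
    · simp [h]

theorem gn_dropWhile_eq_drop {α : Type} (l : List α) (p : α → Bool) :
    l.dropWhile p = l.drop (l.takeWhile p).length := by
  induction l with
  | nil => simp
  | cons x xs ih => by_cases h : p x <;> simp [h, ih]

theorem gn_head_dropWhile {α : Type} (l : List α) (p : α → Bool) :
    ∀ y ∈ (l.dropWhile p).head?, ¬ p y = true := by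
  induction l with
  | nil => simp
  | cons x xs ih =>
    intro y hy
    by_cases h : p x
    · rw [List.dropWhile_cons_of_pos h] at hy
      exact ih y hy
    · rw [List.dropWhile_cons_of_neg h] at hy
      simp at hy
      subst hy
      exact h

-- the inner while-loop appends exactly the digit-run characters and lands just past the run
theorem gnInner_spec (array : List String) : ∀ i number, i ≤ array.length →
    gnInner array i number =
      (number ++ (((array.drop i).takeWhile (fun x => PySem.Str.strIsdigit x)).map String.toList).flatten,
       i + ((array.drop i).takeWhile (fun x => PySem.Str.strIsdigit x)).length) := by
  intro i
  induction hn : array.length - i using Nat.strong_induction_on generalizing i with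
  | _ n ih =>
    intro number hi
    unfold gnInner
    by_cases h : i < array.length
    · have hdrop : array.drop i = array[i] :: array.drop (i + 1) := List.drop_eq_getElem_cons h
      by_cases hd : PySem.Str.strIsdigit array[i] = true
      · rw [dif_pos h, if_pos hd,
          ih (array.length - (i + 1)) (by omega) (i + 1) rfl (number ++ array[i].toList) (by omega),
          hdrop]
        simp only [List.takeWhile_cons]
        rw [if_pos hd]
        simp only [List.map_cons, List.flatten_cons, List.length_cons, Prod.mk.injEq]
        exact ⟨by simp, by omega⟩
      · rw [dif_pos h, if_neg hd, hdrop]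
        simp only [List.takeWhile_cons]
        rw [if_neg hd]
        simp
    · rw [dif_neg h, List.drop_eq_nil_of_le (by omega)]
      simp

-- the outer loop from index i equals B's fold-and-flush over the remaining suffix
theorem gnLoop_spec (array : List String) : ∀ i acc, i ≤ array.length →
    gnLoop array i acc = gnG acc [] (array.drop i) := by
  intro i
  induction hn : array.length - i using Nat.strong_induction_on generalizing i with
  | _ n ih =>
    intro acc hi
    unfold gnLoop
    by_cases h : i < array.length
    · have hdrop : array.drop i = array[i] :: array.drop (i + 1) := List.drop_eq_getElem_cons h
      by_cases hd : PySem.Str.strIsdigit array[i] = true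
      · rw [dif_pos h, if_pos hd]
        set t := (array.drop (i + 1)).takeWhile (fun x => PySem.Str.strIsdigit x) with ht
        set rest := (array.drop (i + 1)).dropWhile (fun x => PySem.Str.strIsdigit x) with hrest
        have hj : i + 1 + t.length ≤ array.length := by
          have h1 := gn_takeWhile_len_le (array.drop (i + 1)) (fun x => PySem.Str.strIsdigit x)
          have h2 : (array.drop (i + 1)).length = array.length - (i + 1) := List.length_drop ..
          rw [← ht] at h1
          omega
        have hdropj : array.drop (i + 1 + t.length) = rest := by
          rw [hrest, gn_dropWhile_eq_drop, ← ht, ← List.drop_drop]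
        have hhead : ∀ y ∈ rest.head?, ¬ PySem.Str.strIsdigit y = true := by
          rw [hrest]
          exact gn_head_dropWhile (array.drop (i + 1)) (fun x => PySem.Str.strIsdigit x)
        simp only [gnInner_spec array (i + 1) array[i].toList (by omega), ← ht]
        rw [ih (array.length - (i + 1 + t.length)) (by omega) (i + 1 + t.length) rfl _ hj, hdropj,
          hdrop]
        conv_rhs => rw [gnG_cons_digit acc [] array[i] (array.drop (i + 1)) hd]
        conv_rhs => rw [List.nil_append]
        conv_rhs => rw [gnG_takeWhile (array.drop (i + 1)) acc [array[i]]]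
        conv_rhs => rw [← ht]
        conv_rhs => rw [← hrest]
        conv_rhs => rw [gnG_flush rest acc ([array[i]] ++ t) hhead]
        conv_rhs => rw [List.singleton_append]
        conv_rhs => rw [gnFlush_cons]
      · rw [dif_pos h, if_neg hd,
          ih (array.length - (i + 1)) (by omega) (i + 1) rfl _ (by omega), hdrop]
        conv_rhs =>
          rw [gnG_cons_nondigit acc [] array[i] (array.drop (i + 1)) hd, gnFlush_nil]
    · rw [dif_neg h, List.drop_eq_nil_of_le (by omega)]
      rfl

-- ===== VERDICT (by name: the statement is the Claim_ definition above) =====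
theorem group_numbers_spec : Claim_equal_group_numbers := by
  intro array _
  unfold Spec_group_numbers group_numbers group_numbers_alt
  rw [gnLoop_spec array 0 [] (Nat.zero_le _), List.drop_zero]
  rfl
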